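-- pv_equiv track=rewrite | github.com/DivyankAgarwal/Leetcode-Solved | 3425-maximum-number-of-potholes-that-can-be-fixed/3425-maximum-number-of-potholes-that-can-be-fixed.py | maxPotholes
-- ===== SOURCE A (Python) =====
-- def maxPotholes(road: str, budget: int) -> int:
--
--     sequences = []
--     n = len(road)
--     i = 0
--
--
--     while i < n:
--         if road[i] == 'x':
--             length = 0
--             while i < n and road[i] == 'x':
--                 length += 1
--                 i += 1
--             sequences.append(length)
--         else:
--             i += 1
--
--
--     sequences.sort(reverse=True)
--
--     total_potholes_fixed = 0
--     remaining_budget = budget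
--
--     for length in sequences:
--
--         cost = length + 1
--         if cost <= remaining_budget:
--             remaining_budget -= cost
--             total_potholes_fixed += length
--         else:
--
--             max_potholes = min(length, remaining_budget - 1)
--             if max_potholes >= 1:
--                 cost = max_potholes + 1
--                 if cost <= remaining_budget:
--                     remaining_budget -= cost
--                     total_potholes_fixed += max_potholes
--
--             break
--
--     return total_potholes_fixed
-- ===== SOURCE B (Python) =====
-- def maxPotholes(road: str, budget: int) -> int:
--     # Counting-sort greedy: bucket the run lengths (each <= len(road)) in one pass,
--     # then walk lengths from longest to shortest -- no comparison sort.
--     cnt = {}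
--     run = 0
--     for ch in road:
--         if ch == 'x':
--             run += 1
--         else:
--             if run > 0:
--                 cnt[run] = cnt.get(run, 0) + 1
--             run = 0
--     if run > 0:
--         cnt[run] = cnt.get(run, 0) + 1
--
--     fixed = 0
--     rem = budget
--     L = len(road)
--     stop = False
--     while L >= 1 and not stop:
--         c = cnt.get(L, 0)
--         while c > 0 and not stop:
--             if L + 1 <= rem:
--                 rem -= L + 1
--                 fixed += L
--             else:
--                 take = min(L, rem - 1)
--                 if take >= 1:
--                     rem -= take + 1
--                     fixed += take
--                 stop = True
--             c -= 1
--         L -= 1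
--     return fixed
-- ===== Notes on version B (the rewrite author's own statement) =====
-- stated objective: alternative
-- what changed: Replaces the index-scan plus comparison sort (sequences.sort(reverse=True)) by a one-pass run-length counting dictionary and a descending walk over possible lengths (a counting sort), keeping the same greedy.
import Mathlib
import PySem

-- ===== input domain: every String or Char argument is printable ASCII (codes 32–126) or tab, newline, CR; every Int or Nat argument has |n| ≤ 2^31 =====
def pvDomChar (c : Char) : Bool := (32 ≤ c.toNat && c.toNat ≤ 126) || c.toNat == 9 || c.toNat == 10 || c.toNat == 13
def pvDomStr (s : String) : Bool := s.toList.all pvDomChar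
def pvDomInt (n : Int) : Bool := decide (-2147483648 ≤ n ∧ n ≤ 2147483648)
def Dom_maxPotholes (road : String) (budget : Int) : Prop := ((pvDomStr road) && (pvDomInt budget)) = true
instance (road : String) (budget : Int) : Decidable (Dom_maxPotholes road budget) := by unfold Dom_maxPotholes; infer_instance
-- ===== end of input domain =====

-- B replaces A's comparison sort of run lengths by a one-pass counting dictionary and a
-- descending walk over possible lengths (a counting sort), keeping the same greedy; objective: alternative.


-- ===== PORT A =====
-- the inner 'while i < n and road[i] == "x"' : count the leading run of 'x'
def takeRun : List Char → Nat × List Char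
  | [] => (0, [])
  | c :: rest => if c = 'x' then ((takeRun rest).1 + 1, (takeRun rest).2) else (0, c :: rest)

theorem takeRun_len_le (cs : List Char) : (takeRun cs).2.length ≤ cs.length := by
  induction cs with
  | nil => simp [takeRun]
  | cons c rest ih =>
    by_cases h : c = 'x' <;> simp [takeRun, h] <;> omega

-- the outer 'while i < n' building `sequences`
def collectRuns : List Char → List Int
  | [] => []
  | c :: rest =>
    if c = 'x' then (((takeRun rest).1 : Int) + 1) :: collectRuns (takeRun rest).2
    else collectRuns rest
termination_by cs => cs.length
decreasing_by
  · have := takeRun_len_le rest; simp; omega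
  · simp

-- the 'for length in sequences' loop with its break
def greedyA : List Int → Int → Int → Int
  | [], _, acc => acc
  | l :: rest, rem, acc =>
    if l + 1 ≤ rem then greedyA rest (rem - (l + 1)) (acc + l)
    else
      let mp := min l (rem - 1)
      if 1 ≤ mp then (if mp + 1 ≤ rem then acc + mp else acc) else acc

def maxPotholes (road : String) (budget : Int) : Int :=
  greedyA (PySem.List.sorted (collectRuns road.toList) (fun x => x) true) budget 0

-- ===== PORT B =====
-- one pass over the road, bucketing finished run lengths in a dict
def countRunsB : List Char → Int → PySem.Dict Int Int → PySem.Dict Int Int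
  | [], run, d => if 0 < run then d.modify run 0 (· + 1) else d
  | c :: rest, run, d =>
    if c = 'x' then countRunsB rest (run + 1) d
    else countRunsB rest 0 (if 0 < run then d.modify run 0 (· + 1) else d)

-- inner 'while c > 0 and not stop' (c ≥ 0 always; recursion on c as fuel); result (rem, fixed, stop)
def innerB (L : Int) : Nat → Int → Int → Int × Int × Bool
  | 0, rem, acc => (rem, acc, false)
  | c + 1, rem, acc =>
    if L + 1 ≤ rem then innerB L c (rem - (L + 1)) (acc + L)
    else
      let take := min L (rem - 1)
      if 1 ≤ take then (rem - (take + 1), acc + take, true) else (rem, acc, true)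

-- outer 'while L >= 1 and not stop', L counting down
def loopB (cnt : PySem.Dict Int Int) : Nat → Int → Int → Int
  | 0, _, acc => acc
  | L + 1, rem, acc =>
    let r := innerB ((L : Int) + 1) ((cnt.getD ((L : Int) + 1) 0).toNat) rem acc
    if r.2.2 then r.2.1 else loopB cnt L r.1 r.2.1

def maxPotholes_alt (road : String) (budget : Int) : Int :=
  loopB (countRunsB road.toList 0 PySem.Dict.empty) road.toList.length budget 0

-- ===== PRECONDITION & SPEC =====
def Spec_maxPotholes (road : String) (budget : Int) (out : Int) : Prop := out = maxPotholes_alt road budget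
instance (road : String) (budget : Int) (out : Int) : Decidable (Spec_maxPotholes road budget out) := by unfold Spec_maxPotholes; infer_instance

-- ===== CLAIM (what is proved, stated in full; the proofs are below) =====
def Claim_equal_maxPotholes : Prop := ∀ (road : String) (budget : Int), Dom_maxPotholes road budget → Spec_maxPotholes road budget (maxPotholes road budget)

-- ===== LEMMAS AND PROOFS =====

-- the runs that A's scan from a state 'already run x's seen' produces
def runsFrom (run : Int) (cs : List Char) : List Int :=
  if run = 0 then collectRuns cs
  else (run + (takeRun cs).1) :: collectRuns (takeRun cs).2

theorem takeRun_x (rest : List Char) :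
    takeRun ('x' :: rest) = ((takeRun rest).1 + 1, (takeRun rest).2) := by
  simp [takeRun]

theorem takeRun_not_x {c : Char} (h : ¬ c = 'x') (rest : List Char) :
    takeRun (c :: rest) = (0, c :: rest) := by
  simp [takeRun, h]

theorem takeRun_fst_le (cs : List Char) : (takeRun cs).1 ≤ cs.length := by
  induction cs with
  | nil => simp [takeRun]
  | cons c rest ih => by_cases h : c = 'x' <;> simp [takeRun, h] <;> omega

theorem collectRuns_x (rest : List Char) :
    collectRuns ('x' :: rest) = (((takeRun rest).1 : Int) + 1) :: collectRuns (takeRun rest).2 := by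
  rw [collectRuns]; simp

theorem collectRuns_not_x {c : Char} (h : ¬ c = 'x') (rest : List Char) :
    collectRuns (c :: rest) = collectRuns rest := by
  rw [collectRuns]; simp [h]

theorem runsFrom_x {run : Int} (hr : 0 ≤ run) (rest : List Char) :
    runsFrom run ('x' :: rest) = runsFrom (run + 1) rest := by
  by_cases h : run = 0
  · subst h
    rw [runsFrom, runsFrom, if_pos rfl, if_neg (by omega : ¬ (0:Int) + 1 = 0), collectRuns_x]
    congr 1
    omega
  · rw [runsFrom, runsFrom, if_neg h, if_neg (by omega : ¬ run + 1 = 0), takeRun_x]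
    congr 1
    push_cast
    ring

theorem runsFrom_not_x {c : Char} (h : ¬ c = 'x') (run : Int) (rest : List Char) :
    runsFrom run (c :: rest) = (if run = 0 then [] else [run]) ++ collectRuns rest := by
  by_cases hr : run = 0
  · simp [runsFrom, hr, collectRuns_not_x h]
  · simp [runsFrom, hr, takeRun_not_x h, collectRuns_not_x h]

-- B's counting pass is the fold of the +1-modify over A's run list
theorem countRunsB_eq (cs : List Char) : ∀ (run : Int) (d : PySem.Dict Int Int), 0 ≤ run →
    countRunsB cs run d = (runsFrom run cs).foldl (fun d L => d.modify L 0 (· + 1)) d := by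
  induction cs with
  | nil =>
    intro run d hr
    by_cases h : run = 0 <;>
      simp [countRunsB, runsFrom, collectRuns, takeRun, h] <;> omega
  | cons c rest ih =>
    intro run d hr
    by_cases hc : c = 'x'
    · subst hc
      rw [countRunsB, if_pos rfl, ih (run + 1) d (by omega), runsFrom_x hr]
    · rw [countRunsB, if_neg hc, ih 0 _ (by omega), runsFrom_not_x hc]
      by_cases h : run = 0
      · simp [h, runsFrom]
      · have hpos : (0 : Int) < run := by omega
        simp [h, hpos, runsFrom]

-- every run length lies in [1, length of the road]
theorem collectRuns_bounds_aux : ∀ (N : Nat) (cs : List Char), cs.length ≤ N →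
    ∀ r ∈ collectRuns cs, 1 ≤ r ∧ r ≤ (cs.length : Int) := by
  intro N
  induction N with
  | zero =>
    intro cs hN r hr
    have : cs = [] := List.length_eq_zero_iff.1 (by omega)
    subst this; simp [collectRuns] at hr
  | succ N ih =>
    intro cs hN r hr
    match cs with
    | [] => simp [collectRuns] at hr
    | c :: rest =>
      by_cases hc : c = 'x'
      · subst hc
        rw [collectRuns_x] at hr
        have h1 := takeRun_fst_le rest
        have h2 := takeRun_len_le rest
        simp only [List.mem_cons] at hr
        rcases hr with hr | hr
        · subst hr; simp; omega
        · have := ih (takeRun rest).2 (by simp at hN; omega) r hr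
          simp at this ⊢; omega
      · rw [collectRuns_not_x hc] at hr
        have := ih rest (by simp at hN; omega) r hr
        simp at this ⊢; omega

theorem collectRuns_bounds (cs : List Char) :
    ∀ r ∈ collectRuns cs, 1 ≤ r ∧ r ≤ (cs.length : Int) :=
  collectRuns_bounds_aux cs.length cs le_rfl

-- the descending bucket list that B's outer loop walks
def bucketList (runs : List Int) : Nat → List Int
  | 0 => []
  | L + 1 => List.replicate (runs.count ((L : Int) + 1)) ((L : Int) + 1) ++ bucketList runs L

theorem mem_bucketList {runs : List Int} : ∀ {L : Nat} {x : Int}, x ∈ bucketList runs L → 1 ≤ x ∧ x ≤ (L : Int) := by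
  intro L
  induction L with
  | zero => intro x hx; simp [bucketList] at hx
  | succ L ih =>
    intro x hx
    simp only [bucketList, List.mem_append] at hx
    rcases hx with hx | hx
    · have := List.eq_of_mem_replicate hx
      subst this; constructor <;> simp
    · have := ih hx
      push_cast; omega

theorem bucketList_pairwise (runs : List Int) : ∀ L : Nat, (bucketList runs L).Pairwise (fun a b => b ≤ a) := by
  intro L
  induction L with
  | zero => simp [bucketList]
  | succ L ih =>
    simp only [bucketList]
    refine List.pairwise_append.2 ⟨List.pairwise_replicate.2 (by simp), ih, ?_⟩
    intro a ha b hb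
    have h1 := List.eq_of_mem_replicate ha
    have h2 := (mem_bucketList hb).2
    subst h1; omega

theorem count_bucketList (runs : List Int) (v : Int) :
    ∀ L : Nat, (bucketList runs L).count v = if 1 ≤ v ∧ v ≤ (L : Int) then runs.count v else 0 := by
  intro L
  induction L with
  | zero =>
    simp only [bucketList, List.count_nil]
    split
    · next hcond => exfalso; push_cast at hcond; omega
    · rfl
  | succ L ih =>
    simp only [bucketList, List.count_append, ih, List.count_replicate]
    by_cases hv : v = (L : Int) + 1
    · subst hv
      rw [if_neg (by omega : ¬ ((1:Int) ≤ (L:Int) + 1 ∧ (L:Int) + 1 ≤ (L:Int))),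
        if_pos (by push_cast; omega : (1:Int) ≤ (L:Int) + 1 ∧ (L:Int) + 1 ≤ ((L + 1 : Nat) : Int))]
      simp
    · have hne : ¬ (((L : Int) + 1) == v) = true := by simp only [beq_iff_eq]; omega
      simp only [if_neg hne, Nat.zero_add]
      by_cases h : 1 ≤ v ∧ v ≤ (L : Int)
      · rw [if_pos h, if_pos (by push_cast; omega : (1:Int) ≤ v ∧ v ≤ ((L + 1 : Nat) : Int))]
      · rw [if_neg h, if_neg (by push_cast at h ⊢; omega)]

theorem bucketList_perm (runs : List Int) (n : Nat)
    (hb : ∀ r ∈ runs, 1 ≤ r ∧ r ≤ (n : Int)) : (bucketList runs n).Perm runs := by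
  refine List.perm_iff_count.2 (fun v => ?_)
  rw [count_bucketList]
  by_cases h : 1 ≤ v ∧ v ≤ (n : Int)
  · simp [h]
  · rw [if_neg h, eq_comm, List.count_eq_zero]
    intro hmem
    exact h (hb v hmem)

-- the sorted-descending run list IS the bucket list
theorem sorted_eq_bucket (runs : List Int) (n : Nat)
    (hb : ∀ r ∈ runs, 1 ≤ r ∧ r ≤ (n : Int)) :
    PySem.List.sorted runs (fun x => x) true = bucketList runs n := by
  apply PySem.List.eq_of_perm_of_pairwise_le_of_injective (key := fun x : Int => -x) neg_injective
  · exact (PySem.List.sorted_perm runs (fun x => x) true).trans (bucketList_perm runs n hb).symm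
  · exact (PySem.List.sorted_pairwise_rev runs (fun x => x)).imp (fun h => neg_le_neg h)
  · exact (bucketList_pairwise runs n).imp (fun h => neg_le_neg h)

-- B's inner loop is the greedy over a block of equal lengths
theorem inner_greedy (L : Int) (rest : List Int) : ∀ (c : Nat) (rem acc : Int),
    greedyA (List.replicate c L ++ rest) rem acc =
      (let r := innerB L c rem acc; if r.2.2 then r.2.1 else greedyA rest r.1 r.2.1) := by
  intro c
  induction c with
  | zero => intro rem acc; simp [innerB]
  | succ c ih =>
    intro rem acc
    simp only [List.replicate_succ, List.cons_append, greedyA, innerB]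
    by_cases h : L + 1 ≤ rem
    · simp only [if_pos h]; exact ih _ _
    · simp only [if_neg h]
      by_cases h1 : 1 ≤ min L (rem - 1)
      · have h2 : min L (rem - 1) + 1 ≤ rem := by omega
        simp [h1, h2]
      · simp [h1]

-- B's outer loop is the greedy over the bucket list
theorem loopB_greedy (cnt : PySem.Dict Int Int) (runs : List Int)
    (hc : ∀ v : Int, cnt.getD v 0 = (runs.count v : Int)) :
    ∀ (L : Nat) (rem acc : Int), loopB cnt L rem acc = greedyA (bucketList runs L) rem acc := by
  intro L
  induction L with
  | zero => intro rem acc; simp [loopB, bucketList, greedyA]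
  | succ L ih =>
    intro rem acc
    simp only [loopB, bucketList]
    rw [inner_greedy]
    have hcount : ((cnt.getD ((L : Int) + 1) 0).toNat) = runs.count ((L : Int) + 1) := by
      rw [hc]; simp
    rw [hcount]
    by_cases hs : (innerB ((L : Int) + 1) (runs.count ((L : Int) + 1)) rem acc).2.2
    · simp [hs]
    · simp only [hs, if_false, Bool.false_eq_true]
      exact ih _ _

-- ===== VERDICT (by name: the statement is the Claim_ definition above) =====
theorem maxPotholes_spec : Claim_equal_maxPotholes := by
  intro road budget _
  unfold Spec_maxPotholes maxPotholes maxPotholes_alt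
  set cs := road.toList with hcs
  have hcnt : ∀ v : Int,
      (countRunsB cs 0 PySem.Dict.empty).getD v 0 = ((collectRuns cs).count v : Int) := by
    intro v
    rw [countRunsB_eq cs 0 PySem.Dict.empty le_rfl]
    simp only [runsFrom, if_pos rfl]
    rw [PySem.Dict.getD_foldl_modify_add_one]
    simp
  rw [loopB_greedy _ (collectRuns cs) hcnt]
  rw [sorted_eq_bucket (collectRuns cs) cs.length (collectRuns_bounds cs)]
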